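-- pv_equiv track=rewrite | github.com/oornnery/sipx | sipx/_transport.py | _find_content_length
-- ===== SOURCE A (Python) =====
-- def _find_content_length(raw: str) -> int:
--     for line in raw.split("\r\n"):
--         if line.lower().startswith("content-length:"):
--             try:
--                 return int(line.split(":")[1].strip())
--             except ValueError:
--                 return 0
--     return 0
-- ===== SOURCE B (Python) =====
-- def _find_content_length(raw: str) -> int:
--     # Build a first-occurrence header table, then do one keyed lookup.
--     headers = {}
--     for line in raw.split("\r\n"):
--         if ":" in line:
--             parts = line.split(":")
--             key = parts[0].lower()
--             if key not in headers:
--                 headers[key] = parts[1]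
--     value = headers.get("content-length")
--     if value is None:
--         return 0
--     try:
--         return int(value.strip())
--     except ValueError:
--         return 0
-- ===== Notes on version B (the rewrite author's own statement) =====
-- stated objective: idiomatic
-- what changed: Replaces the scan-with-early-return over lines by building a first-occurrence header dictionary (key = lowercased text before the first colon) and doing a single keyed lookup of the Content-Length header.
import Mathlib
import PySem

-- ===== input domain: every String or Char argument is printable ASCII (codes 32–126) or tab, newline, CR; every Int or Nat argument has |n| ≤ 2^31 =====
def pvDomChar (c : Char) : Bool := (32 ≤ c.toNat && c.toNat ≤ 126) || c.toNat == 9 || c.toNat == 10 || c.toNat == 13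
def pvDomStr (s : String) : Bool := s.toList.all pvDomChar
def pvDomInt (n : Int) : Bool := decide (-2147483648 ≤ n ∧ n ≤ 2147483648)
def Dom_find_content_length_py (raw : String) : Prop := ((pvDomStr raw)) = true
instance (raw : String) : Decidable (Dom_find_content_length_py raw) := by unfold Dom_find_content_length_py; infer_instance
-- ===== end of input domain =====

-- B replaces A's scan-with-early-return by a first-occurrence header table built once, then one keyed lookup (idiomatic; same cost).

-- ===== PORT A =====
-- scan the lines, returning at the first one whose lowercasing starts with "content-length:"
def fclA_loop : List String → Int
  | [] => 0
  | line :: rest =>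
    if PySem.Str.startswith (PySem.Str.lower line) "content-length:" then
      -- line.split(":")[1] : the index is always in range here (a matching line contains a colon)
      match PySem.List.pyGet? ((PySem.Str.split? line ":").getD []) 1 with
      | none => 0   -- unreachable
      | some v =>
        match PySem.Int.ofStr? (PySem.Str.strip v) with
        | some n => n
        | none => 0   -- except ValueError: return 0
    else fclA_loop rest

def find_content_length_py (raw : String) : Int :=
  fclA_loop ((PySem.Str.split? raw "\r\n").getD [])

-- ===== PORT B =====
-- one step of the header-table build: insert key→value for a colon line, first occurrence wins
def fclB_step (d : PySem.Dict String String) (line : String) : PySem.Dict String String :=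
  if PySem.Str.isIn ":" line then
    let parts := (PySem.Str.split? line ":").getD []
    -- parts has ≥ 2 elements here (the line contains a colon), so both getD defaults are unreachable
    let key := PySem.Str.lower ((PySem.List.pyGet? parts 0).getD "")
    if d.contains key then d else d.insert key ((PySem.List.pyGet? parts 1).getD "")
  else d

def find_content_length_py_alt (raw : String) : Int :=
  let headers := ((PySem.Str.split? raw "\r\n").getD []).foldl fclB_step PySem.Dict.empty
  match headers.get? "content-length" with
  | none => 0
  | some v =>
    match PySem.Int.ofStr? (PySem.Str.strip v) with
    | some n => n
    | none => 0   -- except ValueError: return 0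

-- ===== PRECONDITION & SPEC =====
def Spec_find_content_length_py (raw : String) (out : Int) : Prop := out = find_content_length_py_alt raw
instance (raw : String) (out : Int) : Decidable (Spec_find_content_length_py raw out) := by unfold Spec_find_content_length_py; infer_instance

-- ===== CLAIM (what is proved, stated in full; the proofs are below) =====
def Claim_equal_find_content_length_py : Prop := ∀ (raw : String), Dom_find_content_length_py raw → Spec_find_content_length_py raw (find_content_length_py raw)

-- ===== LEMMAS AND PROOFS =====

theorem lowerChar_eq_colon {c : Char} (h : PySem.Chars.lowerChar c = ':') : c = ':' := by
  unfold PySem.Chars.lowerChar PySem.Chars.isupper at h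
  split at h
  · next hc =>
    exfalso
    simp only [Bool.and_eq_true, decide_eq_true_eq] at hc
    have h1 : 65 ≤ c.toNat := Nat.succ_le_of_lt hc.1
    have h2 : c.toNat ≤ 90 := Nat.lt_succ_iff.mp (Nat.lt_succ_of_le hc.2)
    have hv : Nat.isValidChar (c.toNat + 32) := Or.inl (by omega)
    have := congrArg Char.toNat h
    rw [Char.toNat_ofNat] at this
    simp only [hv, if_true] at this
    have hco : (':').toNat = 58 := rfl
    omega
  · exact h
def splitOnChar (c : Char) : List Char → List (List Char)
  | [] => [[]]
  | x :: xs => if x = c then [] :: splitOnChar c xs else (splitOnChar c xs).modifyHead (x :: ·)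

theorem splitOnChar_ne_nil (c : Char) (s : List Char) : splitOnChar c s ≠ [] := by
  induction s with
  | nil => simp [splitOnChar]
  | cons x xs ih =>
    simp only [splitOnChar]
    split
    · simp
    · cases h : splitOnChar c xs with
      | nil => exact absurd h ih
      | cons a t => simp

theorem splitOn_go_single (c : Char) (l : List Char) : ∀ (fuel : Nat) (cur : List Char) (acc : List (List Char)),
    l.length ≤ fuel →
    PySem.Chars.splitOn.go [c] fuel l cur acc = acc.reverse ++ (splitOnChar c l).modifyHead (cur.reverse ++ ·) := by
  induction l with
  | nil =>
    intro fuel cur acc _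
    cases fuel <;> simp [PySem.Chars.splitOn.go, splitOnChar]
  | cons x xs ih =>
    intro fuel cur acc hlen
    cases fuel with
    | zero => simp at hlen
    | succ fuel =>
      rw [PySem.Chars.splitOn.go]
      simp only [List.length_cons, Nat.add_le_add_iff_right] at hlen
      by_cases hx : c = x
      · subst hx
        have hpre : List.isPrefixOf [c] (c :: xs) = true := by simp [List.isPrefixOf]
        simp only [hpre, if_pos, List.length_cons, List.length_nil, List.drop_succ_cons,
          List.drop_zero]
        rw [ih fuel [] (cur.reverse :: acc) hlen]
        simp only [splitOnChar, if_pos, List.reverse_nil, List.nil_append, List.reverse_cons,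
          List.modifyHead_cons, List.append_nil, List.append_assoc, List.singleton_append]
        cases splitOnChar c xs <;> simp
      · have hpre : List.isPrefixOf [c] (x :: xs) = false := by
          simp [List.isPrefixOf]; exact hx
        rw [hpre]
        simp only [Bool.false_eq_true, if_false]
        rw [ih fuel (x :: cur) acc hlen]
        have hfx : ¬ (x = c) := fun h => hx h.symm
        simp only [splitOnChar, hfx, if_false, List.modifyHead_modifyHead]
        congr 2
        funext y
        simp

theorem splitOn_single (c : Char) (s : List Char) : PySem.Chars.splitOn s [c] = splitOnChar c s := by
  rw [PySem.Chars.splitOn, splitOn_go_single c s (s.length + 1) [] [] (by omega)]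
  simp only [List.reverse_nil, List.nil_append]
  cases splitOnChar c s <;> simp

theorem splitOnChar_unfold (c : Char) (s : List Char) :
    splitOnChar c s = s.takeWhile (· ≠ c) ::
      (if c ∈ s then splitOnChar c ((s.dropWhile (· ≠ c)).tail) else []) := by
  induction s with
  | nil => simp [splitOnChar]
  | cons x xs ih =>
    by_cases hx : x = c
    · subst hx
      simp [splitOnChar]
    · have hx' : (x ≠ c) = True := by simp [hx]
      simp only [splitOnChar, hx, if_false, ih, List.modifyHead_cons,
        List.takeWhile_cons, List.dropWhile_cons, hx', decide_true]
      simp only [if_true, List.mem_cons, or_iff_right (fun h : c = x => hx h.symm)]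

theorem startswith_lower_colon (P s : List Char) (hP : (':') ∉ P) :
    PySem.Chars.startswith (PySem.Chars.lower s) (P ++ [':']) = true ↔
      ((':') ∈ s ∧ PySem.Chars.lower (s.takeWhile (· ≠ ':')) = P) := by
  have lowerColon : PySem.Chars.lowerChar ':' = ':' := by decide
  constructor
  · intro h
    rw [PySem.Chars.startswith_iff] at h
    obtain ⟨rest, hrest⟩ := h
    have hmap : PySem.Chars.lower s = (P ++ [':']) ++ rest := hrest.symm
    rw [PySem.Chars.lower, List.map_eq_append_iff] at hmap
    obtain ⟨u, v, hs, hu, hv⟩ := hmap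
    rw [List.map_eq_append_iff] at hu
    obtain ⟨u', w, huw, hu', hw⟩ := hu
    have hwch : ∃ ch, w = [ch] ∧ PySem.Chars.lowerChar ch = ':' := by
      cases w with
      | nil => simp at hw
      | cons a t =>
        cases t with
        | nil => exact ⟨a, rfl, by simpa using hw⟩
        | cons b t2 => simp at hw
    obtain ⟨ch, hwc, hch⟩ := hwch
    have hchc : ch = ':' := lowerChar_eq_colon hch
    subst hwc hchc huw
    have hnc : ∀ a ∈ u', decide (a ≠ ':') = true := by
      intro a ha
      simp only [ne_eq, decide_eq_true_eq]
      intro hac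
      subst hac
      have hmem : PySem.Chars.lowerChar ':' ∈ List.map PySem.Chars.lowerChar u' :=
        List.mem_map_of_mem ha
      rw [hu', lowerColon] at hmem
      exact hP hmem
    constructor
    · rw [hs]; simp
    · have htw : (u' ++ [':'] ++ v).takeWhile (· ≠ ':') = u' := by
        rw [List.append_assoc, List.takeWhile_append]
        rw [List.takeWhile_eq_self_iff.mpr hnc]
        simp
      rw [hs, htw, ← hu']
      rfl
  · rintro ⟨hm, hl⟩
    have hd : s.dropWhile (· ≠ ':') ≠ [] := by
      intro hnil
      rw [List.dropWhile_eq_nil_iff] at hnil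
      have := hnil ':' hm
      simp at this
    obtain ⟨a, t, ht⟩ := List.exists_cons_of_ne_nil hd
    have hhead : ∀ (l : List Char) (h : l ≠ []) (b : Char) (t' : List Char), l = b :: t' → l.head h = b := by
      intro l h b t' he
      subst he
      rfl
    have ha : a = ':' := by
      have h1 := List.head_dropWhile_not (fun x => decide (x ≠ ':')) hd
      rw [hhead _ hd a t ht] at h1
      simpa using h1
    have hs : s = s.takeWhile (· ≠ ':') ++ ':' :: t := by
      conv_lhs => rw [← List.takeWhile_append_dropWhile (p := fun x => x ≠ ':') (l := s)]
      rw [ht, ha]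
    rw [PySem.Chars.startswith_iff]
    refine ⟨PySem.Chars.lower t, ?_⟩
    conv_rhs => rw [hs]
    simp only [PySem.Chars.lower, List.map_append, List.map_cons, lowerColon] at hl ⊢
    rw [hl]
    simp

def firstVal : List String → Option String
  | [] => none
  | l :: rest =>
    if PySem.Str.startswith (PySem.Str.lower l) "content-length:" then
      some ((PySem.List.pyGet? ((PySem.Str.split? l ":").getD []) 1).getD "")
    else firstVal rest

-- parts of a line, at the char level
theorem split_colon (line : String) :
    ∃ ps : List String, PySem.Str.split? line ":" = some ps ∧
      ps.map String.toList = splitOnChar ':' line.toList := by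
  have h := PySem.Str.split?_map line ":"
  have hsep : (":" : String).toList = [':'] := by decide
  rw [hsep] at h
  rw [PySem.Chars.split?] at h
  simp only [List.isEmpty_cons] at h
  cases hs : PySem.Str.split? line ":" with
  | none => rw [hs] at h; simp at h
  | some ps =>
    rw [hs] at h
    simp at h
    exact ⟨ps, rfl, by rw [h, splitOn_single]⟩

theorem keyfact (line : String) :
    (PySem.Str.startswith (PySem.Str.lower line) "content-length:" = true) ↔
      (PySem.Str.isIn ":" line = true ∧
       PySem.Str.lower ((PySem.List.pyGet? ((PySem.Str.split? line ":").getD []) 0).getD "") = "content-length") := by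
  obtain ⟨ps, hps, hmap⟩ := split_colon line
  have hP : (':') ∉ ("content-length" : String).toList := by decide
  have hpat : ("content-length:" : String).toList = ("content-length" : String).toList ++ [':'] := by decide
  have hstart : PySem.Str.startswith (PySem.Str.lower line) "content-length:" =
      PySem.Chars.startswith (PySem.Chars.lower line.toList) (("content-length" : String).toList ++ [':']) := by
    rw [PySem.Str.startswith_eq, PySem.Str.toList_lower, hpat]
  have hisin : PySem.Str.isIn ":" line = PySem.Chars.isIn [':'] line.toList := by
    rw [PySem.Str.isIn_eq]; rfl
  have hmem : PySem.Chars.isIn [':'] line.toList = true ↔ (':') ∈ line.toList := by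
    rw [PySem.Chars.isIn_iff_infix]
    constructor
    · rintro ⟨l₁, l₂, he⟩
      rw [← he]; simp
    · intro hm
      obtain ⟨l₁, l₂, he⟩ := List.append_of_mem hm
      exact ⟨l₁, l₂, by rw [he]; simp⟩
  -- the key equals "content-length" iff lower (takeWhile …) = its chars
  have hkey : PySem.Str.lower ((PySem.List.pyGet? ((PySem.Str.split? line ":").getD []) 0).getD "") =
        ("content-length" : String) ↔
      PySem.Chars.lower (line.toList.takeWhile (· ≠ ':')) = ("content-length" : String).toList := by
    rw [hps]
    have hne : splitOnChar ':' line.toList ≠ [] := splitOnChar_ne_nil _ _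
    have h0 : PySem.List.pyGet? ps 0 = ps[0]? := by
      have := PySem.List.pyGet?_natCast ps 0
      simpa using this
    rw [splitOnChar_unfold] at hmap
    cases ps with
    | nil => simp at hmap
    | cons p0 pt =>
      simp only [List.map_cons, List.cons.injEq] at hmap
      obtain ⟨hp0, _⟩ := hmap
      simp only [Option.getD_some, h0, List.getElem?_cons_zero]
      rw [← String.toList_inj, PySem.Str.toList_lower, hp0]
  rw [hstart, hisin, startswith_lower_colon _ _ hP, hmem, hkey]

theorem fclA_loop_eq (lines : List String) :
    fclA_loop lines = (match firstVal lines with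
      | none => 0
      | some v => (match PySem.Int.ofStr? (PySem.Str.strip v) with
        | some n => n
        | none => 0)) := by
  induction lines with
  | nil => rfl
  | cons l rest ih =>
    simp only [fclA_loop, firstVal]
    split
    · cases h : PySem.List.pyGet? ((PySem.Str.split? l ":").getD []) 1 with
      | none => simp; decide
      | some v => simp
    · exact ih

theorem build_get? (lines : List String) : ∀ (d : PySem.Dict String String),
    (lines.foldl fclB_step d).get? "content-length" = (d.get? "content-length").or (firstVal lines) := by
  induction lines with
  | nil => intro d; simp [firstVal]
  | cons l rest ih =>
    intro d
    rw [List.foldl_cons, ih]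
    by_cases hc : PySem.Str.isIn ":" l = true
    · by_cases hk : PySem.Str.lower ((PySem.List.pyGet? ((PySem.Str.split? l ":").getD []) 0).getD "") = ("content-length" : String)
      · have hcond : PySem.Str.startswith (PySem.Str.lower l) "content-length:" = true :=
          (keyfact l).mpr ⟨hc, hk⟩
        simp only [firstVal, hcond, if_true]
        simp only [fclB_step]
        rw [if_pos hc, hk]
        cases hget : d.get? "content-length" with
        | some v =>
          have hcont : d.contains "content-length" = true := by
            rw [PySem.Dict.contains_eq_isSome_get?, hget]; rfl
          rw [if_pos hcont, hget]
          rfl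
        | none =>
          have hcont : d.contains "content-length" = false := by
            rw [PySem.Dict.contains_eq_isSome_get?, hget]; rfl
          rw [if_neg (by simp [hcont]), PySem.Dict.get?_insert_self]
          rfl
      · have hcond : PySem.Str.startswith (PySem.Str.lower l) "content-length:" = false := by
          cases hsw : PySem.Str.startswith (PySem.Str.lower l) "content-length:" with
          | false => rfl
          | true => exact absurd ((keyfact l).mp hsw).2 hk
        simp only [firstVal, hcond, Bool.false_eq_true, if_false]
        simp only [fclB_step]
        rw [if_pos hc]
        split
        · rfl
        · rw [PySem.Dict.get?_insert_of_ne _ _ (fun h => hk h.symm)]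
    · have hcond : PySem.Str.startswith (PySem.Str.lower l) "content-length:" = false := by
        cases hsw : PySem.Str.startswith (PySem.Str.lower l) "content-length:" with
        | false => rfl
        | true => exact absurd ((keyfact l).mp hsw).1 hc
      simp only [firstVal, hcond, Bool.false_eq_true, if_false]
      simp only [fclB_step]
      rw [if_neg hc]

-- ===== VERDICT (by name: the statement is the Claim_ definition above) =====
theorem find_content_length_py_spec : Claim_equal_find_content_length_py := by
  intro raw _
  unfold Spec_find_content_length_py find_content_length_py find_content_length_py_alt
  simp only [fclA_loop_eq, build_get?, PySem.Dict.get?_empty, Option.none_or]
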